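-- pv_equiv track=rewrite | github.com/Mahmoud-Ibrahim-750/DataCompression | repeatitive_sequence_suppression.py | suppress_repetitive_sequence
-- ===== SOURCE A (Python) =====
-- def suppress_repetitive_sequence(sequence):
--     result = ""  # Initialize an empty string to store the suppressed sequence
--     count = 1  # Initialize a counter to keep track of the length of the current repetitive sequence
--     for i in range(1, len(sequence)):
--         # If the current element is equal to the previous element, increase the counter
--         if sequence[i] == sequence[i - 1]:
--             count += 1
--         else:  # If the current element is not equal to the previous element
--             if count >= 2:  # If the length of the current sequence is greater than 1
--                 # mark the occurrence of the repeated element along with the count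
--                 result += "".join(f"r{sequence[i - 1]}{count}")
--             else:  # If the length of the current repetitive sequence is NOT greater than 1
--                 # just append the character to the result string
--                 result += "".join(sequence[i - count:i])
--             count = 1  # Reset the counter for the next sequence
--
--     # the last character or sequence (as no character next to the last one)
--     if count >= 2:  # If the length of the current sequence is greater than 1
--         # mark the occurrence of the repeated element along with the count
--         result += "".join(f"r{sequence[-1]}{count}")
--     else:  # If the length of the current repetitive sequence is NOT greater than 1
--         # just append the character to the result string
--         result += "".join(sequence[len(sequence) - count:])
--
--     return result  # Return the resulting sequence
-- ===== SOURCE B (Python) =====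
-- def suppress_repetitive_sequence(sequence):
--     pieces = []
--     i, n = 0, len(sequence)
--     while i < n:
--         j = i
--         while j < n and sequence[j] == sequence[i]:
--             j += 1
--         run = j - i
--         pieces.append(f"r{sequence[i]}{run}" if run >= 2 else sequence[i])
--         i = j
--     return "".join(pieces)
-- ===== Notes on version B (the rewrite author's own statement) =====
-- stated objective: simpler
-- what changed: B extracts each maximal run with an inner scan and encodes it immediately into a pieces list joined once, instead of A's single index loop with a lagging counter, slice-based singleton emission and a duplicated trailing-run flush.
import Mathlib
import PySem

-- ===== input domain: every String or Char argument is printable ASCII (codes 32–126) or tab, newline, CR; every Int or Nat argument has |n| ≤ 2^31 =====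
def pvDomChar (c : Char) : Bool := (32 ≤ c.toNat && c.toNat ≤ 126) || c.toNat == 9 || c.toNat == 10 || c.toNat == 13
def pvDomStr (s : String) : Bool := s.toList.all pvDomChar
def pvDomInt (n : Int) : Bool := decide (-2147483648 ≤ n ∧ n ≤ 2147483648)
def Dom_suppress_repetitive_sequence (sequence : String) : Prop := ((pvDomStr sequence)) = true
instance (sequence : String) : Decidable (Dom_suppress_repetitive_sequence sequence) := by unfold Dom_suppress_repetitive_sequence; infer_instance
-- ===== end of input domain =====

-- B replaces A's lagging-counter index loop (with its duplicated trailing flush) by extracting each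
-- maximal run with an inner scan and encoding it immediately; objective: simpler. Same output everywhere.

-- ===== PORT A =====
-- the for-loop over range(1, len) with state (result, count), then the trailing flush
def pvA_loop (s : List Char) (i : Nat) (result : List Char) (count : Nat) : List Char :=
  if i < s.length then
    if s.getD i ' ' = s.getD (i - 1) ' ' then
      pvA_loop s (i + 1) result (count + 1)
    else if count ≥ 2 then
      pvA_loop s (i + 1) (result ++ 'r' :: s.getD (i - 1) ' ' :: (PySem.Int.toStr (count : Int)).toList) 1
    else
      pvA_loop s (i + 1) (result ++ PySem.List.slice s (some ((i : Int) - (count : Int))) (some (i : Int))) 1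
  else if count ≥ 2 then
    result ++ 'r' :: (PySem.List.pyGet? s (-1)).getD ' ' :: (PySem.Int.toStr (count : Int)).toList
  else
    result ++ PySem.List.slice s (some ((s.length : Int) - (count : Int))) none
termination_by s.length - i

def suppress_repetitive_sequence (sequence : String) : String :=
  String.mk (pvA_loop sequence.toList 1 [] 1)

-- ===== PORT B =====
-- the outer while loop: each step peels one maximal run (the inner while is the takeWhile scan)
def pvRuns (s : List Char) : List (Char × Nat) :=
  match s with
  | [] => []
  | c :: rest =>
      (c, (rest.takeWhile (fun d => d = c)).length + 1) :: pvRuns (rest.dropWhile (fun d => d = c))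
termination_by s.length
decreasing_by simp; exact List.length_dropWhile_le _ _

-- one appended piece: "r{c}{run}" if run >= 2 else the single character
def pvPiece (p : Char × Nat) : List Char :=
  if p.2 ≥ 2 then 'r' :: p.1 :: (PySem.Int.toStr (p.2 : Int)).toList else [p.1]

-- "".join(pieces)
def pvEnc (s : List Char) : List Char := ((pvRuns s).map pvPiece).flatten

def suppress_repetitive_sequence_alt (sequence : String) : String :=
  String.mk (pvEnc sequence.toList)

-- ===== PRECONDITION & SPEC =====
def Spec_suppress_repetitive_sequence (sequence : String) (out : String) : Prop := out = suppress_repetitive_sequence_alt sequence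
instance (sequence : String) (out : String) : Decidable (Spec_suppress_repetitive_sequence sequence out) := by unfold Spec_suppress_repetitive_sequence; infer_instance

-- ===== CLAIM (what is proved, stated in full; the proofs are below) =====
def Claim_equal_suppress_repetitive_sequence : Prop := ∀ (sequence : String), Dom_suppress_repetitive_sequence sequence → Spec_suppress_repetitive_sequence sequence (suppress_repetitive_sequence sequence)

-- ===== LEMMAS AND PROOFS =====

theorem pvRuns_nil : pvRuns [] = [] := by rw [pvRuns]

theorem pvRuns_cons (c : Char) (rest : List Char) :
    pvRuns (c :: rest) =
      (c, (rest.takeWhile (fun d => d = c)).length + 1) :: pvRuns (rest.dropWhile (fun d => d = c)) := by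
  rw [pvRuns]

theorem takeWhile_replicate_append (c : Char) (t : List Char) (n : Nat) :
    (List.replicate n c ++ t).takeWhile (fun d => d = c) = List.replicate n c ++ t.takeWhile (fun d => d = c) := by
  induction n with
  | zero => simp
  | succ n ih => simp [List.replicate_succ, ih]

theorem dropWhile_replicate_append (c : Char) (t : List Char) (n : Nat) :
    (List.replicate n c ++ t).dropWhile (fun d => d = c) = t.dropWhile (fun d => d = c) := by
  induction n with
  | zero => simp
  | succ n ih => simp [List.replicate_succ, ih]

theorem runs_rep (c : Char) (n : Nat) (hn : 1 ≤ n) (t : List Char) :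
    pvRuns (List.replicate n c ++ t) =
      (c, n + (t.takeWhile (fun d => d = c)).length) :: pvRuns (t.dropWhile (fun d => d = c)) := by
  obtain ⟨m, rfl⟩ : ∃ m, n = m + 1 := ⟨n - 1, by omega⟩
  rw [List.replicate_succ, List.cons_append, pvRuns_cons,
    takeWhile_replicate_append, dropWhile_replicate_append]
  congr 2
  simp
  omega

theorem enc_rep (c : Char) (n : Nat) (hn : 1 ≤ n) (t : List Char)
    (ht : t ≠ [] → t.getD 0 ' ' ≠ c) :
    pvEnc (List.replicate n c ++ t) = pvPiece (c, n) ++ pvEnc t := by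
  have htw : t.takeWhile (fun d => d = c) = [] := by
    cases t with
    | nil => simp
    | cons x xs =>
      have : x ≠ c := by simpa using ht (by simp)
      simp [this]
  have hdw : t.dropWhile (fun d => d = c) = t := by
    cases t with
    | nil => simp
    | cons x xs =>
      have : x ≠ c := by simpa using ht (by simp)
      simp [this]
  simp [pvEnc, runs_rep c n hn t, htw, hdw]

theorem loop_inv (k : Nat) : ∀ (s : List Char) (i : Nat) (result : List Char) (count : Nat),
    s.length - i = k → 1 ≤ i → i ≤ s.length → 1 ≤ count → count ≤ i →
    (∀ j, i - count ≤ j → j < i → s.getD j ' ' = s.getD (i - 1) ' ') →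
    pvA_loop s i result count =
      result ++ pvEnc (List.replicate count (s.getD (i - 1) ' ') ++ s.drop i) := by
  induction k with
  | zero =>
    intro s i result count hk hi1 hil hc1 hci _hrun
    have hiL : i = s.length := by omega
    subst hiL
    rw [pvA_loop]
    simp only [lt_irrefl, if_false]
    have hlast : s.drop (s.length - 1) = [s.getD (s.length - 1) ' '] := by
      rw [List.drop_eq_getElem_cons (by omega : s.length - 1 < s.length),
        show s.length - 1 + 1 = s.length by omega, List.drop_length,
        List.getD_eq_getElem?_getD, List.getElem?_eq_getElem (by omega : s.length - 1 < s.length),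
        Option.getD_some]
    by_cases h2 : count ≥ 2
    · simp only [h2, if_true]
      have hget : (PySem.List.pyGet? s (-1)).getD ' ' = s.getD (s.length - 1) ' ' := by
        rw [PySem.List.pyGet?_neg_one, List.getLast?_eq_getElem?]
        simp [List.getD_eq_getElem?_getD]
      rw [hget, List.drop_length]
      rw [enc_rep _ count (by omega) [] (by simp)]
      simp [pvPiece, h2, pvEnc, pvRuns_nil]
    · have hc : count = 1 := by omega
      subst hc
      simp only [h2, if_false]
      have hcast : (s.length : Int) - ((1 : Nat) : Int) = ((s.length - 1 : Nat) : Int) := by omega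
      rw [hcast, PySem.List.slice_from_natCast, hlast, List.drop_length]
      rw [enc_rep _ 1 (by omega) [] (by simp)]
      simp [pvPiece, pvEnc, pvRuns_nil]
  | succ k ih =>
    intro s i result count hk hi1 hil hc1 hci hrun
    have hiL : i < s.length := by omega
    have hdropi : s.drop i = s.getD i ' ' :: s.drop (i + 1) := by
      rw [List.drop_eq_getElem_cons hiL, List.getD_eq_getElem?_getD,
        List.getElem?_eq_getElem hiL, Option.getD_some]
    rw [pvA_loop]
    simp only [hiL, if_true]
    by_cases heq : s.getD i ' ' = s.getD (i - 1) ' '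
    · simp only [heq, if_true]
      rw [ih s (i + 1) result (count + 1) (by omega) (by omega) (by omega) (by omega) (by omega)
        (by
          intro j hj1 hj2
          simp only [Nat.add_sub_cancel]
          rcases Nat.lt_or_ge j i with hji | hji
          · exact (hrun j (by omega) hji).trans heq.symm
          · have : j = i := by omega
            subst this; rfl)]
      simp only [Nat.add_sub_cancel]
      rw [heq, hdropi, heq, List.replicate_succ']
      simp
    · simp only [heq, if_false]
      have htail : pvEnc (s.drop i) =
          pvEnc (List.replicate 1 (s.getD ((i + 1) - 1) ' ') ++ s.drop (i + 1)) := by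
        simp only [Nat.add_sub_cancel]
        rw [hdropi]; simp
      have hencfull : pvEnc (List.replicate count (s.getD (i - 1) ' ') ++ s.drop i) =
          pvPiece (s.getD (i - 1) ' ', count) ++ pvEnc (s.drop i) := by
        apply enc_rep _ count (by omega)
        intro _
        rw [hdropi]
        simpa using heq
      by_cases h2 : count ≥ 2
      · simp only [h2, if_true]
        rw [ih s (i + 1) _ 1 (by omega) (by omega) (by omega) (by omega) (by omega)
          (by intro j hj1 hj2
              have : j = (i + 1) - 1 := by omega
              rw [this])]
        rw [← htail, hencfull]
        simp [pvPiece, h2]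
      · have hc1' : count = 1 := by omega
        subst hc1'
        simp only [h2, if_false]
        have hslice : PySem.List.slice s (some ((i : Int) - ((1 : Nat) : Int))) (some (i : Int)) =
            [s.getD (i - 1) ' '] := by
          have hcast : (i : Int) - ((1 : Nat) : Int) = ((i - 1 : Nat) : Int) := by omega
          rw [hcast, PySem.List.slice_natCast]
          calc (List.drop (i - 1) s).take (i - (i - 1))
              = (s[i - 1]'(by omega) :: List.drop (i - 1 + 1) s).take 1 := by
                rw [List.drop_eq_getElem_cons (by omega : i - 1 < s.length),
                  show i - (i - 1) = 1 by omega]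
            _ = [s[i - 1]'(by omega)] := rfl
            _ = [s.getD (i - 1) ' '] := by
                rw [List.getD_eq_getElem?_getD,
                  List.getElem?_eq_getElem (by omega : i - 1 < s.length), Option.getD_some]
        rw [ih s (i + 1) _ 1 (by omega) (by omega) (by omega) (by omega) (by omega)
          (by intro j hj1 hj2
              have : j = (i + 1) - 1 := by omega
              rw [this])]
        rw [← htail, hencfull, hslice]
        simp [pvPiece]

-- ===== VERDICT (by name: the statement is the Claim_ definition above) =====
theorem suppress_repetitive_sequence_spec : Claim_equal_suppress_repetitive_sequence := by
  intro sequence _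
  unfold Spec_suppress_repetitive_sequence suppress_repetitive_sequence suppress_repetitive_sequence_alt
  cases hs : sequence.toList with
  | nil => simp [pvA_loop, pvEnc, pvRuns_nil, PySem.List.slice_from_neg_one]
  | cons c t =>
    rw [loop_inv ((c :: t).length - 1) (c :: t) 1 [] 1 rfl (by omega) (by simp) (by omega) (by omega)
      (by intro j hj1 hj2
          have : j = 0 := by omega
          subst this; rfl)]
    simp
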